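-- pv_equiv track=rewrite | github.com/manaskarra/strato | backend/alto/context.py | extract_crypto_symbols
-- ===== SOURCE A (Python) =====
-- from typing import Optional, Dict, List, Any
--
-- def extract_crypto_symbols(message: str) -> List[str]:
--     """Extract all crypto symbols from message"""
--     crypto_keywords = [
--         'bitcoin', 'btc', 'ethereum', 'eth', 'crypto', 'cryptocurrency',
--         'dogecoin', 'doge', 'cardano', 'ada', 'solana', 'sol'
--     ]
--     message_lower = message.lower()
--
--     # Map common names to symbols
--     symbol_map = {
--         'bitcoin': 'BTC', 'btc': 'BTC',
--         'ethereum': 'ETH', 'eth': 'ETH',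
--         'dogecoin': 'DOGE', 'doge': 'DOGE',
--         'cardano': 'ADA', 'ada': 'ADA',
--         'solana': 'SOL', 'sol': 'SOL',
--     }
--
--     found_symbols = []
--     for keyword in crypto_keywords:
--         if keyword in message_lower and keyword in symbol_map:
--             symbol = symbol_map[keyword]
--             if symbol not in found_symbols:  # Avoid duplicates
--                 found_symbols.append(symbol)
--
--     return found_symbols
-- ===== SOURCE B (Python) =====
-- CRYPTO_GROUPS = [
--     ("BTC", ["bitcoin", "btc"]),
--     ("ETH", ["ethereum", "eth"]),
--     ("DOGE", ["dogecoin", "doge"]),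
--     ("ADA", ["cardano", "ada"]),
--     ("SOL", ["solana", "sol"]),
-- ]
--
-- def extract_crypto_symbols(message: str):
--     """Extract all crypto symbols from message"""
--     ml = message.lower()
--     return [sym for sym, kws in CRYPTO_GROUPS if any(k in ml for k in kws)]
-- ===== Notes on version B (the rewrite author's own statement) =====
-- stated objective: simpler
-- what changed: Replaces the flat keyword list plus name->symbol dict plus dedup membership check with a single ordered list of (symbol, keywords) groups, iterating once per symbol and appending it if any of its keywords occurs in the lowercased message.
import Mathlib
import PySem

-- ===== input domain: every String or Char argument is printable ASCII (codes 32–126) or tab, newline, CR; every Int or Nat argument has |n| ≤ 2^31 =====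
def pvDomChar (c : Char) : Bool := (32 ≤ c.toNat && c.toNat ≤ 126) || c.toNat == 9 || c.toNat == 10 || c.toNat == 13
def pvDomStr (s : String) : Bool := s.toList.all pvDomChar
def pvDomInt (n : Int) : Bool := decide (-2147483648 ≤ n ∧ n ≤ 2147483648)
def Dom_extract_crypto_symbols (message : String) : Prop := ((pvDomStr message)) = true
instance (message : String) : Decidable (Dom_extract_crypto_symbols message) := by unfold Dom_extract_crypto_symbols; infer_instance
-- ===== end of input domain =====

-- B replaces A's flat keyword list + name->symbol dict + dedup check by one ordered
-- list of (symbol, keywords) groups scanned once per symbol (objective: simpler).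

-- ===== PORT A =====
def extract_crypto_symbols (message : String) : List String :=
  let crypto_keywords : List String :=
    ["bitcoin", "btc", "ethereum", "eth", "crypto", "cryptocurrency",
     "dogecoin", "doge", "cardano", "ada", "solana", "sol"]
  let message_lower := PySem.Str.lower message
  let symbol_map : PySem.Dict String String := PySem.Dict.ofList
    [("bitcoin", "BTC"), ("btc", "BTC"),
     ("ethereum", "ETH"), ("eth", "ETH"),
     ("dogecoin", "DOGE"), ("doge", "DOGE"),
     ("cardano", "ADA"), ("ada", "ADA"),
     ("solana", "SOL"), ("sol", "SOL")]
  crypto_keywords.foldl (fun found_symbols keyword =>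
    if PySem.Str.isIn keyword message_lower && symbol_map.contains keyword then
      match symbol_map.get? keyword with
      | some symbol => if symbol ∈ found_symbols then found_symbols else found_symbols ++ [symbol]
      | none => found_symbols
    else found_symbols) []

-- ===== PORT B =====
def pvCryptoGroups : List (String × List String) :=
  [("BTC", ["bitcoin", "btc"]),
   ("ETH", ["ethereum", "eth"]),
   ("DOGE", ["dogecoin", "doge"]),
   ("ADA", ["cardano", "ada"]),
   ("SOL", ["solana", "sol"])]

def extract_crypto_symbols_alt (message : String) : List String :=
  let ml := PySem.Str.lower message
  (pvCryptoGroups.filter (fun g => g.2.any (fun k => PySem.Str.isIn k ml))).map Prod.fst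

-- ===== PRECONDITION & SPEC =====
def Spec_extract_crypto_symbols (message : String) (out : List String) : Prop := out = extract_crypto_symbols_alt message
instance (message : String) (out : List String) : Decidable (Spec_extract_crypto_symbols message out) := by unfold Spec_extract_crypto_symbols; infer_instance

-- ===== CLAIM (what is proved, stated in full; the proofs are below) =====
def Claim_equal_extract_crypto_symbols : Prop := ∀ (message : String), Dom_extract_crypto_symbols message → Spec_extract_crypto_symbols message (extract_crypto_symbols message)

-- ===== LEMMAS AND PROOFS =====

-- Both programs read the input only through the twelve substring tests on the
-- lowercased message: pvRunA/pvRunB are the two computations as functions of those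
-- Booleans, tied to the ports by `rfl` and compared exhaustively by `decide`.
def pvRunA (b1 b2 b3 b4 b5 b6 b7 b8 b9 b10 b11 b12 : Bool) : List String :=
  let step : List String → Bool → String → List String := fun found b sym =>
    if b then (if sym ∈ found then found else found ++ [sym]) else found
  let f1 := step [] (b1 && true) "BTC"
  let f2 := step f1 (b2 && true) "BTC"
  let f3 := step f2 (b3 && true) "ETH"
  let f4 := step f3 (b4 && true) "ETH"
  let f5 := if b5 && false then f4 else f4      -- 'crypto' is not in symbol_map
  let f6 := if b6 && false then f5 else f5      -- 'cryptocurrency' is not in symbol_map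
  let f7 := step f6 (b7 && true) "DOGE"
  let f8 := step f7 (b8 && true) "DOGE"
  let f9 := step f8 (b9 && true) "ADA"
  let f10 := step f9 (b10 && true) "ADA"
  let f11 := step f10 (b11 && true) "SOL"
  step f11 (b12 && true) "SOL"

def pvRunB (b1 b2 b3 b4 b7 b8 b9 b10 b11 b12 : Bool) : List String :=
  (if b1 || (b2 || false) then ["BTC"] else []) ++
  ((if b3 || (b4 || false) then ["ETH"] else []) ++
   ((if b7 || (b8 || false) then ["DOGE"] else []) ++
    ((if b9 || (b10 || false) then ["ADA"] else []) ++
     (if b11 || (b12 || false) then ["SOL"] else []))))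

theorem pvRunA_eq_pvRunB :
    ∀ b1 b2 b3 b4 b5 b6 b7 b8 b9 b10 b11 b12 : Bool,
      pvRunA b1 b2 b3 b4 b5 b6 b7 b8 b9 b10 b11 b12 = pvRunB b1 b2 b3 b4 b7 b8 b9 b10 b11 b12 := by
  decide

theorem extract_crypto_symbols_eq (message : String) :
    extract_crypto_symbols message = extract_crypto_symbols_alt message := by
  have hA : extract_crypto_symbols message =
      pvRunA (PySem.Str.isIn "bitcoin" (PySem.Str.lower message))
        (PySem.Str.isIn "btc" (PySem.Str.lower message))
        (PySem.Str.isIn "ethereum" (PySem.Str.lower message))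
        (PySem.Str.isIn "eth" (PySem.Str.lower message))
        (PySem.Str.isIn "crypto" (PySem.Str.lower message))
        (PySem.Str.isIn "cryptocurrency" (PySem.Str.lower message))
        (PySem.Str.isIn "dogecoin" (PySem.Str.lower message))
        (PySem.Str.isIn "doge" (PySem.Str.lower message))
        (PySem.Str.isIn "cardano" (PySem.Str.lower message))
        (PySem.Str.isIn "ada" (PySem.Str.lower message))
        (PySem.Str.isIn "solana" (PySem.Str.lower message))
        (PySem.Str.isIn "sol" (PySem.Str.lower message)) := rfl
  have hB : extract_crypto_symbols_alt message =
      pvRunB (PySem.Str.isIn "bitcoin" (PySem.Str.lower message))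
        (PySem.Str.isIn "btc" (PySem.Str.lower message))
        (PySem.Str.isIn "ethereum" (PySem.Str.lower message))
        (PySem.Str.isIn "eth" (PySem.Str.lower message))
        (PySem.Str.isIn "dogecoin" (PySem.Str.lower message))
        (PySem.Str.isIn "doge" (PySem.Str.lower message))
        (PySem.Str.isIn "cardano" (PySem.Str.lower message))
        (PySem.Str.isIn "ada" (PySem.Str.lower message))
        (PySem.Str.isIn "solana" (PySem.Str.lower message))
        (PySem.Str.isIn "sol" (PySem.Str.lower message)) := by
    simp only [extract_crypto_symbols_alt, pvCryptoGroups, pvRunB, List.filter_cons,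
      List.filter_nil, List.any_cons, List.any_nil, Bool.or_false]
    split_ifs <;> simp_all
  rw [hA, hB, pvRunA_eq_pvRunB]

-- ===== VERDICT (by name: the statement is the Claim_ definition above) =====
theorem extract_crypto_symbols_spec : Claim_equal_extract_crypto_symbols := by
  intro message _
  unfold Spec_extract_crypto_symbols
  exact extract_crypto_symbols_eq message
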